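-- pv_equiv track=rewrite | github.com/shencode76/Near-Duplicate-Detection-Using-Bloom-Filters-and-LSH | a2/src/a2/dedup.py | find_candidate_pairs_multi_probe
-- ===== SOURCE A (Python) =====
-- def find_candidate_pairs_multi_probe(band_hashes, num_probes=2):
--     """
--     Finds candidate document pairs using Multi-Probe LSH.
--     :param band_hashes: List of LSH hashes for documents.
--     :param num_probes: Number of nearby buckets to probe for potential candidates.
--     :return: Set of candidate document pairs.
--     """
--     buckets = {}
--     candidate_pairs = set()
--
--     for doc_id, hash_list in enumerate(band_hashes):
--         for band_id, band_hash in enumerate(hash_list):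
--             # Main bucket
--             if (band_id, band_hash) not in buckets:
--                 buckets[(band_id, band_hash)] = []
--             for candidate_doc_id in buckets[(band_id, band_hash)]:
--                 candidate_pairs.add((min(doc_id, candidate_doc_id), max(doc_id, candidate_doc_id)))
--             buckets[(band_id, band_hash)].append(doc_id)
--
--             # Probe nearby buckets
--             for probe in range(1, num_probes + 1):
--                 nearby_hash = band_hash + probe
--                 if (band_id, nearby_hash) in buckets:
--                     for candidate_doc_id in buckets[(band_id, nearby_hash)]:
--                         candidate_pairs.add((min(doc_id, candidate_doc_id), max(doc_id, candidate_doc_id)))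
--
--     return candidate_pairs
-- ===== SOURCE B (Python) =====
-- def find_candidate_pairs_multi_probe(band_hashes, num_probes=2):
--     """Two-pass LSH: first build a (band, hash) -> doc ids index over all
--     documents, then pair each document with the earlier docs sharing its band
--     hash and, per probe offset, with the earlier docs in the nearby bucket."""
--     index = {}
--     for i, hash_list in enumerate(band_hashes):
--         for band_id, band_hash in enumerate(hash_list):
--             index.setdefault((band_id, band_hash), []).append(i)
--
--     candidate_pairs = set()
--     for j, hash_list in enumerate(band_hashes):
--         for band_id, band_hash in enumerate(hash_list):
--             for i in index.get((band_id, band_hash), ()):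
--                 if i >= j:
--                     break
--                 candidate_pairs.add((i, j))
--             for probe in range(1, num_probes + 1):
--                 for i in index.get((band_id, band_hash + probe), ()):
--                     if i >= j:
--                         break
--                     candidate_pairs.add((i, j))
--     return candidate_pairs
-- ===== Notes on version B (the rewrite author's own statement) =====
-- stated objective: alternative
-- what changed: B replaces A's single interleaved pass (building bucket lists while emitting pairs against them) by two phases: it first builds the complete (band, hash) -> doc-id index over all documents, then for each document scans its own and each probed bucket, cutting each bucket at the first doc id not smaller than the current one.
import Mathlib
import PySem

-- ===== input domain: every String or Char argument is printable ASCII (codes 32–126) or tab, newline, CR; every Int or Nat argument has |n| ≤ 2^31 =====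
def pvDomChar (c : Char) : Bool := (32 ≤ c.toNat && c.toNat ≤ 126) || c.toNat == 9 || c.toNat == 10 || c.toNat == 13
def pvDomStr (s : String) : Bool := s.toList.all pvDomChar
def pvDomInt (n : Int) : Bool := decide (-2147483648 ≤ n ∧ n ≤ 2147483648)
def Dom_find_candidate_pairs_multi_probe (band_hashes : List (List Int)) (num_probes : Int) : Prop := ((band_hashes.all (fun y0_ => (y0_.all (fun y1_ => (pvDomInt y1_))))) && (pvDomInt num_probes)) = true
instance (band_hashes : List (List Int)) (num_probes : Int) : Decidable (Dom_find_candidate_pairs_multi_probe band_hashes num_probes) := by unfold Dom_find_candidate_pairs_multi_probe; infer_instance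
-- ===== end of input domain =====

-- B replaces A's incremental LSH bucket dictionary by a direct pairwise scan over
-- earlier documents, per band and probe offset; same return value (a set of pairs).

-- ===== PORT A =====
-- body of A's inner 'for band_id, band_hash in enumerate(hash_list)' loop:
-- ensure main bucket, pair with its members, append doc_id, then probe nearby buckets
def A_band (num_probes doc_id : Int)
    (st : PySem.Dict (Int × Int) (List Int) × PySem.Set (Int × Int)) (bp : Int × Int) :
    PySem.Dict (Int × Int) (List Int) × PySem.Set (Int × Int) :=
  let buckets := if st.1.contains (bp.1, bp.2) then st.1 else st.1.insert (bp.1, bp.2) []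
  let pairs := (buckets.getD (bp.1, bp.2) []).foldl
      (fun s c => PySem.Set.add s (min doc_id c, max doc_id c)) st.2
  let buckets := buckets.modify (bp.1, bp.2) [] (fun l => l ++ [doc_id])
  (PySem.List.pyRange 1 (num_probes + 1) 1).foldl (fun st2 probe =>
    if st2.1.contains (bp.1, bp.2 + probe) then
      (st2.1, (st2.1.getD (bp.1, bp.2 + probe) []).foldl
          (fun s c => PySem.Set.add s (min doc_id c, max doc_id c)) st2.2)
    else st2) (buckets, pairs)

def find_candidate_pairs_multi_probe (band_hashes : List (List Int)) (num_probes : Int) :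
    List (Int × Int) :=
  ((PySem.List.enumerate band_hashes).foldl
    (fun st dp => (PySem.List.enumerate dp.2).foldl (A_band num_probes dp.1) st)
    (PySem.Dict.empty, PySem.Set.empty)).2

-- ===== PORT B =====
-- Source B phase 1: 'index.setdefault((band_id, band_hash), []).append(i)' over all documents
def B_index (band_hashes : List (List Int)) : PySem.Dict (Int × Int) (List Int) :=
  (PySem.List.enumerate band_hashes).foldl (fun d ip =>
    (PySem.List.enumerate ip.2).foldl (fun d bp =>
      d.modify (bp.1, bp.2) [] (fun l => l ++ [ip.1])) d) PySem.Dict.empty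

-- Source B's bucket scan 'for i in index.get(key, ()): if i >= j: break; add (i, j)':
-- stop at the first i ≥ j, i.e. takeWhile (i < j), then add each (i, j)
def find_candidate_pairs_multi_probe_alt (band_hashes : List (List Int)) (num_probes : Int) :
    List (Int × Int) :=
  let index := B_index band_hashes
  (PySem.List.enumerate band_hashes).foldl (fun pairs jp =>
    (PySem.List.enumerate jp.2).foldl (fun pairs bp =>
      (PySem.List.pyRange 1 (num_probes + 1) 1).foldl (fun pairs probe =>
          ((index.getD (bp.1, bp.2 + probe) []).takeWhile (fun i => decide (i < jp.1))).foldl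
            (fun s i => PySem.Set.add s (i, jp.1)) pairs)
        (((index.getD (bp.1, bp.2) []).takeWhile (fun i => decide (i < jp.1))).foldl
          (fun s i => PySem.Set.add s (i, jp.1)) pairs)) pairs)
    PySem.Set.empty

-- ===== PRECONDITION & SPEC =====
def Spec_find_candidate_pairs_multi_probe (band_hashes : List (List Int)) (num_probes : Int) (out : List (Int × Int)) : Prop := out = find_candidate_pairs_multi_probe_alt band_hashes num_probes
instance (band_hashes : List (List Int)) (num_probes : Int) (out : List (Int × Int)) : Decidable (Spec_find_candidate_pairs_multi_probe band_hashes num_probes out) := by unfold Spec_find_candidate_pairs_multi_probe; infer_instance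

-- ===== CLAIM (what is proved, stated in full; the proofs are below) =====
def Claim_equal_find_candidate_pairs_multi_probe : Prop := ∀ (band_hashes : List (List Int)) (num_probes : Int), Dom_find_candidate_pairs_multi_probe band_hashes num_probes → Spec_find_candidate_pairs_multi_probe band_hashes num_probes (find_candidate_pairs_multi_probe band_hashes num_probes)

-- ===== LEMMAS AND PROOFS =====

-- the documents whose band-b hash equals target, with their indices, in order
def B_docs (docs : List (List Int)) (b target : Int) : List Int :=
  (PySem.List.enumerate docs).filterMap (fun ip =>
    if b < (ip.2.length : Int) ∧ PySem.List.pyGetD ip.2 b 0 = target then some ip.1 else none)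


-- B_docs pref b h is exactly A's bucket (b, h) after the documents `pref`:
-- invariant tying A's bucket dictionary to the processed prefix
def BucketsRel (pref : List (List Int)) (D : PySem.Dict (Int × Int) (List Int)) : Prop :=
  ∀ b h : Int, 0 ≤ b →
    D.getD (b, h) [] = B_docs pref b h ∧
    D.contains (b, h) = !(B_docs pref b h).isEmpty

theorem mem_B_docs {pref : List (List Int)} {b h i : Int}
    (hm : i ∈ B_docs pref b h) : 0 ≤ i ∧ i < (pref.length : Int) := by
  unfold B_docs at hm
  rw [List.mem_filterMap] at hm
  obtain ⟨ip, hip, hcond⟩ := hm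
  rw [PySem.List.mem_enumerate_iff] at hip
  obtain ⟨k, hk, rfl⟩ := hip
  split at hcond
  · simp only [Option.some.injEq] at hcond
    subst hcond
    constructor <;> omega
  · exact absurd hcond (by simp)

theorem B_docs_nil (b h : Int) : B_docs [] b h = [] := rfl

theorem B_docs_append_singleton (pref : List (List Int)) (d : List Int) (b h : Int) :
    B_docs (pref ++ [d]) b h
      = B_docs pref b h
        ++ (if b < (d.length : Int) ∧ PySem.List.pyGetD d b 0 = h
            then [(pref.length : Int)] else []) := by
  unfold B_docs
  rw [PySem.List.enumerate_append, List.filterMap_append]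
  congr 1
  by_cases hc : b < (d.length : Int) ∧ PySem.List.pyGetD d b 0 = h
  · simp [PySem.List.enumerate, hc]
  · simp [PySem.List.enumerate, hc]

-- A's min/max normalisation is the identity on bucket members (all earlier than j)
theorem scan_minmax_eq (pref : List (List Int)) (b h : Int)
    (S : PySem.Set (Int × Int)) :
    (B_docs pref b h).foldl
        (fun s c => PySem.Set.add s (min (pref.length : Int) c, max (pref.length : Int) c)) S
      = (B_docs pref b h).foldl (fun s c => PySem.Set.add s (c, (pref.length : Int))) S := by
  apply PySem.List.foldl_congr_mem
  intro acc c hc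
  obtain ⟨h0, h1⟩ := mem_B_docs hc
  rw [min_eq_right (le_of_lt h1), max_eq_left (le_of_lt h1)]

-- the probe loop never modifies the bucket dictionary
theorem probe_fold_fst (b0 h0 j : Int) :
    ∀ (l : List Int) (D : PySem.Dict (Int × Int) (List Int)) (S : PySem.Set (Int × Int)),
    l.foldl (fun st2 probe =>
        if st2.1.contains (b0, h0 + probe) then
          (st2.1, (st2.1.getD (b0, h0 + probe) []).foldl
              (fun s c => PySem.Set.add s (min j c, max j c)) st2.2)
        else st2) (D, S)
      = (D, l.foldl (fun S probe =>
          if D.contains (b0, h0 + probe) then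
            (D.getD (b0, h0 + probe) []).foldl
              (fun s c => PySem.Set.add s (min j c, max j c)) S
          else S) S) := by
  intro l
  induction l with
  | nil => intro D S; rfl
  | cons x xs ih =>
    intro D S
    rw [List.foldl_cons, List.foldl_cons]
    by_cases h : D.contains (b0, h0 + x) = true
    · simp [h, ih]
    · rw [Bool.not_eq_true] at h
      simp [h, ih]

theorem B_docs_band_ge (pref : List (List Int)) (d : List Int) (b h : Int)
    (hb : (d.length : Int) ≤ b) :
    B_docs (pref ++ [d]) b h = B_docs pref b h := by
  rw [B_docs_append_singleton]
  have : ¬ (b < (d.length : Int) ∧ PySem.List.pyGetD d b 0 = h) := by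
    rintro ⟨h1, _⟩; omega
  simp [this]

-- extending the current document by one band only changes its own bucket
theorem B_docs_mid (pref : List (List Int)) (done : List Int) (h0 : Int) (b h : Int)
    (hb : 0 ≤ b) (hne : ¬ (b = (done.length : Int) ∧ h = h0)) :
    B_docs (pref ++ [done ++ [h0]]) b h = B_docs (pref ++ [done]) b h := by
  rw [B_docs_append_singleton, B_docs_append_singleton]
  congr 1
  have hcond : (b < (((done ++ [h0]).length : Nat) : Int) ∧ PySem.List.pyGetD (done ++ [h0]) b 0 = h)
      ↔ (b < ((done.length : Nat) : Int) ∧ PySem.List.pyGetD done b 0 = h) := by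
    by_cases hlt : b < ((done.length : Nat) : Int)
    · have hget : PySem.List.pyGetD (done ++ [h0]) b 0 = PySem.List.pyGetD done b 0 := by
        rw [PySem.List.pyGetD_eq_getElem _ _ hb (by simp only [List.length_append, List.length_cons, List.length_nil]; push_cast; omega),
            PySem.List.pyGetD_eq_getElem _ _ hb (by omega)]
        exact List.getElem_append_left (by omega)
      have h1 : b < (((done ++ [h0]).length : Nat) : Int) := by simp only [List.length_append, List.length_cons, List.length_nil]; push_cast; omega
      rw [hget]
      exact ⟨fun ⟨_, hx⟩ => ⟨hlt, hx⟩, fun ⟨_, hx⟩ => ⟨h1, hx⟩⟩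
    · by_cases heq : b = ((done.length : Nat) : Int)
      · have hh : h ≠ h0 := fun hh => hne ⟨heq, hh⟩
        have hget : PySem.List.pyGetD (done ++ [h0]) b 0 = h0 := by
          rw [PySem.List.pyGetD_eq_getElem _ _ hb (by simp only [List.length_append, List.length_cons, List.length_nil]; push_cast; omega)]
          have hbt : b.toNat = done.length := by omega
          simp [hbt]
        constructor
        · rintro ⟨_, hx⟩; rw [hget] at hx; exact absurd hx.symm hh
        · rintro ⟨hx, _⟩; exact absurd hx hlt
      · have h1 : ¬ b < (((done ++ [h0]).length : Nat) : Int) := by simp only [List.length_append, List.length_cons, List.length_nil]; push_cast; omega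
        exact ⟨fun ⟨hx, _⟩ => absurd hx h1, fun ⟨hx, _⟩ => absurd hx hlt⟩
  rw [if_congr hcond rfl rfl]

theorem BucketsRel_append_nil (pref : List (List Int)) (D : PySem.Dict (Int × Int) (List Int))
    (hrel : BucketsRel pref D) : BucketsRel (pref ++ [[]]) D := by
  intro b h hb
  have := hrel b h hb
  rwa [B_docs_band_ge pref [] b h (by simp; omega)]

-- one band of the current document: A's bucket update + pairings versus B's two scans
-- (the matching-hash scan, then one scan per probe offset)
theorem A_band_step (P : Int) (pref : List (List Int)) (done : List Int) (h0 : Int)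
    (D : PySem.Dict (Int × Int) (List Int)) (S : PySem.Set (Int × Int))
    (hrel : BucketsRel (pref ++ [done]) D) :
    BucketsRel (pref ++ [done ++ [h0]])
        (A_band P (pref.length : Int) (D, S) ((done.length : Int), h0)).1 ∧
    (A_band P (pref.length : Int) (D, S) ((done.length : Int), h0)).2
      = (PySem.List.pyRange 1 (P + 1) 1).foldl (fun S d =>
            (B_docs pref (done.length : Int) (h0 + d)).foldl
              (fun s i => PySem.Set.add s (i, (pref.length : Int))) S)
          ((B_docs pref (done.length : Int) h0).foldl
            (fun s i => PySem.Set.add s (i, (pref.length : Int))) S) := by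
  have hb0 : (0 : Int) ≤ (done.length : Int) := Int.natCast_nonneg _
  -- the transient dict with the main bucket ensured
  set D2 := if D.contains ((done.length : Int), h0) then D
            else D.insert ((done.length : Int), h0) [] with hD2def
  have hD2getD : ∀ k : Int × Int, D2.getD k [] = D.getD k [] := by
    intro k
    rw [hD2def]
    by_cases hct : D.contains ((done.length : Int), h0) = true
    · simp [hct]
    · rw [Bool.not_eq_true] at hct
      rw [hct, if_neg (by simp), PySem.Dict.getD_insert]
      split
      · next hk => rw [hk, PySem.Dict.getD_of_not_contains _ _ hct]
      · rfl
  have hD2contains : ∀ k : Int × Int,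
      D2.contains k = (k == ((done.length : Int), h0) || D.contains k) := by
    intro k
    rw [hD2def]
    by_cases hct : D.contains ((done.length : Int), h0) = true
    · rw [if_pos hct]
      by_cases hk : k = ((done.length : Int), h0)
      · simp [hk, hct]
      · simp [hk]
    · rw [Bool.not_eq_true] at hct
      rw [hct, if_neg (by simp), PySem.Dict.contains_insert]
  -- the dict after appending the current document to its bucket
  set D3 := D2.modify ((done.length : Int), h0) [] (fun l => l ++ [(pref.length : Int)])
    with hD3def
  have hD3getD : ∀ k : Int × Int, D3.getD k []
      = if k = ((done.length : Int), h0)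
        then D.getD ((done.length : Int), h0) [] ++ [(pref.length : Int)]
        else D.getD k [] := by
    intro k
    rw [hD3def, PySem.Dict.getD_modify]
    split <;> simp [hD2getD]
  have hD3contains : ∀ k : Int × Int,
      D3.contains k = (k == ((done.length : Int), h0) || D.contains k) := by
    intro k
    rw [hD3def, PySem.Dict.contains_modify, hD2contains]
    by_cases hk : k = ((done.length : Int), h0) <;> simp [hk]
  have hmainbucket : D.getD ((done.length : Int), h0) [] = B_docs pref (done.length : Int) h0 := by
    rw [(hrel _ h0 hb0).1, B_docs_band_ge _ _ _ _ le_rfl]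
  -- the dict invariant advances by one band
  have hrel3 : BucketsRel (pref ++ [done ++ [h0]]) D3 := by
    intro b h hb
    by_cases hk : ((b, h) : Int × Int) = ((done.length : Int), h0)
    · rw [Prod.mk.injEq] at hk
      obtain ⟨hb', hh'⟩ := hk
      subst hb'
      rw [hh']
      have hmodel : B_docs (pref ++ [done ++ [h0]]) (done.length : Int) h0
          = B_docs pref (done.length : Int) h0 ++ [(pref.length : Int)] := by
        rw [B_docs_append_singleton]
        have hc : (done.length : Int) < (((done ++ [h0]).length : Nat) : Int)
            ∧ PySem.List.pyGetD (done ++ [h0]) (done.length : Int) 0 = h0 := by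
          constructor
          · simp only [List.length_append, List.length_cons, List.length_nil]; push_cast; omega
          · rw [PySem.List.pyGetD_eq_getElem _ _ hb0
              (by simp only [List.length_append, List.length_cons, List.length_nil]; push_cast; omega)]
            simp
        rw [if_pos hc]
      refine ⟨?_, ?_⟩
      · rw [hD3getD, if_pos rfl, hmodel, hmainbucket]
      · rw [hD3contains, hmodel]
        simp
    · have hne : ¬ (b = (done.length : Int) ∧ h = h0) := by
        intro ⟨h1, h2⟩; exact hk (by rw [h1, h2])
      have hmid := B_docs_mid pref done h0 b h hb hne
      refine ⟨?_, ?_⟩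
      · rw [hD3getD, if_neg hk, hmid]
        exact (hrel b h hb).1
      · rw [hD3contains, hmid]
        have : (((b, h) : Int × Int) == ((done.length : Int), h0)) = false := by
          simp [hk]
        rw [this, Bool.false_or]
        exact (hrel b h hb).2
  have hunfold : A_band P (pref.length : Int) (D, S) ((done.length : Int), h0)
      = (PySem.List.pyRange 1 (P + 1) 1).foldl (fun st2 probe =>
          if st2.1.contains ((done.length : Int), h0 + probe) then
            (st2.1, (st2.1.getD ((done.length : Int), h0 + probe) []).foldl
                (fun s c => PySem.Set.add s (min (pref.length : Int) c, max (pref.length : Int) c)) st2.2)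
          else st2)
        (D3, (D2.getD ((done.length : Int), h0) []).foldl
            (fun s c => PySem.Set.add s (min (pref.length : Int) c, max (pref.length : Int) c)) S) := rfl
  rw [hunfold, probe_fold_fst]
  refine ⟨hrel3, ?_⟩
  show _ = (PySem.List.pyRange 1 (P + 1) 1).foldl _ _
  have hS1 : (D2.getD ((done.length : Int), h0) []).foldl
      (fun s c => PySem.Set.add s (min (pref.length : Int) c, max (pref.length : Int) c)) S
      = (B_docs pref (done.length : Int) h0).foldl
          (fun s i => PySem.Set.add s (i, (pref.length : Int))) S := by
    rw [hD2getD, hmainbucket, scan_minmax_eq]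
  rw [hS1]
  apply PySem.List.foldl_congr_mem
  intro acc p hp
  have hp1 : 1 ≤ p := (PySem.List.mem_pyRange_one.mp hp).1
  have hkne : (((done.length : Int), h0 + p) : Int × Int) ≠ ((done.length : Int), h0) := by
    intro hE
    have := (Prod.ext_iff.mp hE).2
    omega
  have hgetD : D3.getD ((done.length : Int), h0 + p) []
      = B_docs pref (done.length : Int) (h0 + p) := by
    rw [hD3getD, if_neg hkne, (hrel _ _ hb0).1, B_docs_band_ge _ _ _ _ le_rfl]
  have hcont : D3.contains ((done.length : Int), h0 + p)
      = !(B_docs pref (done.length : Int) (h0 + p)).isEmpty := by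
    rw [hD3contains]
    have hbeq : ((((done.length : Int), h0 + p) : Int × Int) == ((done.length : Int), h0)) = false := by
      simp [hkne]
    rw [hbeq, Bool.false_or, (hrel _ _ hb0).2, B_docs_band_ge _ _ _ _ le_rfl]
  by_cases hE : (B_docs pref (done.length : Int) (h0 + p)).isEmpty = true
  · have hnil : B_docs pref (done.length : Int) (h0 + p) = [] := List.isEmpty_iff.mp hE
    rw [if_neg (by rw [hcont, hE]; simp), hnil, List.foldl_nil]
  · rw [if_pos (by rw [hcont]; simp [hE]), hgetD, scan_minmax_eq]

-- core: one document's band loop — A's state fold versus B's scans over the prefix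
theorem band_loop (P : Int) (pref : List (List Int)) :
    ∀ (rest done : List Int) (D : PySem.Dict (Int × Int) (List Int))
      (S : PySem.Set (Int × Int)), BucketsRel (pref ++ [done]) D →
    BucketsRel (pref ++ [done ++ rest])
        ((PySem.List.enumerate rest (done.length : Int)).foldl
          (A_band P (pref.length : Int)) (D, S)).1 ∧
    ((PySem.List.enumerate rest (done.length : Int)).foldl
        (A_band P (pref.length : Int)) (D, S)).2
      = (PySem.List.enumerate rest (done.length : Int)).foldl (fun S bp =>
          (PySem.List.pyRange 1 (P + 1) 1).foldl (fun S d =>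
              (B_docs pref bp.1 (bp.2 + d)).foldl
                (fun s i => PySem.Set.add s (i, (pref.length : Int))) S)
            ((B_docs pref bp.1 bp.2).foldl
              (fun s i => PySem.Set.add s (i, (pref.length : Int))) S)) S := by
  intro rest
  induction rest with
  | nil =>
    intro done D S hrel
    simpa [PySem.List.enumerate] using hrel
  | cons h0 rest ih =>
    intro done D S hrel
    rw [PySem.List.enumerate_cons, List.foldl_cons, List.foldl_cons]
    obtain ⟨hrel', hS'⟩ := A_band_step P pref done h0 D S hrel
    obtain ⟨hA, hB⟩ := ih (done ++ [h0])
      (A_band P (pref.length : Int) (D, S) ((done.length : Int), h0)).1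
      (A_band P (pref.length : Int) (D, S) ((done.length : Int), h0)).2 hrel'
    have hlen : (((done ++ [h0]).length : Nat) : Int) = (done.length : Int) + 1 := by
      simp
    rw [hlen] at hA hB
    constructor
    · rw [show (done ++ h0 :: rest) = ((done ++ [h0]) ++ rest) by simp]
      exact hA
    · rw [hB, hS']

theorem outer_loop (P : Int) (bh : List (List Int)) :
    ∀ (rest pref : List (List Int)) (D : PySem.Dict (Int × Int) (List Int))
      (S : PySem.Set (Int × Int)), bh = pref ++ rest → BucketsRel pref D →
    ((PySem.List.enumerate rest (pref.length : Int)).foldl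
        (fun st dp => (PySem.List.enumerate dp.2).foldl (A_band P dp.1) st) (D, S)).2
      = (PySem.List.enumerate rest (pref.length : Int)).foldl (fun S jp =>
          (PySem.List.enumerate jp.2).foldl (fun S bp =>
            (PySem.List.pyRange 1 (P + 1) 1).foldl (fun S d =>
                (B_docs (PySem.List.slice bh none (some jp.1)) bp.1 (bp.2 + d)).foldl
                  (fun s i => PySem.Set.add s (i, jp.1)) S)
              ((B_docs (PySem.List.slice bh none (some jp.1)) bp.1 bp.2).foldl
                (fun s i => PySem.Set.add s (i, jp.1)) S)) S) S := by
  intro rest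
  induction rest with
  | nil => intro pref D S hbh hrel; rfl
  | cons hj rest ih =>
    intro pref D S hbh hrel
    rw [PySem.List.enumerate_cons, List.foldl_cons, List.foldl_cons]
    have hslice : PySem.List.slice bh none (some (pref.length : Int)) = pref := by
      rw [PySem.List.slice_to_natCast, hbh, List.take_left]
    obtain ⟨hA, hB⟩ := band_loop P pref hj [] D S (BucketsRel_append_nil pref D hrel)
    rw [show ((([] : List Int).length : Nat) : Int) = 0 from rfl] at hA hB
    have hstep := ih (pref ++ [hj])
      ((PySem.List.enumerate hj).foldl (A_band P (pref.length : Int)) (D, S)).1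
      ((PySem.List.enumerate hj).foldl (A_band P (pref.length : Int)) (D, S)).2
      (by rw [hbh]; simp) hA
    have hlen : (((pref ++ [hj]).length : Nat) : Int) = (pref.length : Int) + 1 := by simp
    rw [hlen] at hstep
    rw [hstep, hB, hslice]


-- ===== B-side lemmas: the prebuilt index and the takeWhile cut =====

-- invariant tying the index under construction to the processed document prefix
def IndexRel (pref : List (List Int)) (d : PySem.Dict (Int × Int) (List Int)) : Prop :=
  ∀ b h : Int, 0 ≤ b → d.getD (b, h) [] = B_docs pref b h

theorem index_step (pref : List (List Int)) (done : List Int) (h0 : Int)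
    (d : PySem.Dict (Int × Int) (List Int)) (hd : IndexRel (pref ++ [done]) d) :
    IndexRel (pref ++ [done ++ [h0]])
      (d.modify ((done.length : Int), h0) [] (fun l => l ++ [(pref.length : Int)])) := by
  intro b h hb
  rw [PySem.Dict.getD_modify]
  by_cases hk : ((b, h) : Int × Int) = ((done.length : Int), h0)
  · rw [if_pos hk]
    rw [Prod.mk.injEq] at hk
    obtain ⟨hb', hh'⟩ := hk
    subst hb'
    rw [hh']
    have hmodel : B_docs (pref ++ [done ++ [h0]]) (done.length : Int) h0
        = B_docs pref (done.length : Int) h0 ++ [(pref.length : Int)] := by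
      rw [B_docs_append_singleton]
      have hc : (done.length : Int) < (((done ++ [h0]).length : Nat) : Int)
          ∧ PySem.List.pyGetD (done ++ [h0]) (done.length : Int) 0 = h0 := by
        constructor
        · simp only [List.length_append, List.length_cons, List.length_nil]; push_cast; omega
        · rw [PySem.List.pyGetD_eq_getElem _ _ (Int.natCast_nonneg _)
            (by simp only [List.length_append, List.length_cons, List.length_nil]; push_cast; omega)]
          simp
      rw [if_pos hc]
    rw [hmodel, hd _ h0 (Int.natCast_nonneg _), B_docs_band_ge _ _ _ _ le_rfl]
  · rw [if_neg hk]
    have hne : ¬ (b = (done.length : Int) ∧ h = h0) := by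
      intro ⟨h1, h2⟩; exact hk (by rw [h1, h2])
    rw [B_docs_mid pref done h0 b h hb hne]
    exact hd b h hb

theorem index_doc (pref : List (List Int)) :
    ∀ (rest done : List Int) (d : PySem.Dict (Int × Int) (List Int)),
    IndexRel (pref ++ [done]) d →
    IndexRel (pref ++ [done ++ rest])
      ((PySem.List.enumerate rest (done.length : Int)).foldl
        (fun d bp => d.modify (bp.1, bp.2) [] (fun l => l ++ [(pref.length : Int)])) d) := by
  intro rest
  induction rest with
  | nil =>
    intro done d hd
    simpa [PySem.List.enumerate] using hd
  | cons h0 rest ih =>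
    intro done d hd
    rw [PySem.List.enumerate_cons, List.foldl_cons]
    have hstep := index_step pref done h0 d hd
    have := ih (done ++ [h0]) _ hstep
    have hlen : (((done ++ [h0]).length : Nat) : Int) = (done.length : Int) + 1 := by simp
    rw [hlen] at this
    rwa [show (done ++ h0 :: rest) = ((done ++ [h0]) ++ rest) by simp] 

theorem index_all :
    ∀ (rest pref : List (List Int)) (d : PySem.Dict (Int × Int) (List Int)),
    IndexRel pref d →
    IndexRel (pref ++ rest)
      ((PySem.List.enumerate rest (pref.length : Int)).foldl (fun d ip =>
        (PySem.List.enumerate ip.2).foldl (fun d bp =>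
          d.modify (bp.1, bp.2) [] (fun l => l ++ [ip.1])) d) d) := by
  intro rest
  induction rest with
  | nil => intro pref d hd; simpa [PySem.List.enumerate] using hd
  | cons hj rest ih =>
    intro pref d hd
    rw [PySem.List.enumerate_cons, List.foldl_cons]
    have hrel0 : IndexRel (pref ++ [[]]) d := by
      intro b h hb
      rw [B_docs_band_ge pref [] b h (by simp; omega)]
      exact hd b h hb
    have h1 := index_doc pref hj [] d hrel0
    rw [show ((([] : List Int).length : Nat) : Int) = 0 from rfl, List.nil_append] at h1
    have h2 := ih (pref ++ [hj]) _ h1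
    have hlen : (((pref ++ [hj]).length : Nat) : Int) = (pref.length : Int) + 1 := by simp
    rw [hlen] at h2
    rwa [show (pref ++ hj :: rest) = ((pref ++ [hj]) ++ rest) by simp]

theorem B_index_spec (bh : List (List Int)) : IndexRel bh (B_index bh) := by
  have h := index_all bh [] PySem.Dict.empty
    (by intro b hh hb; rw [PySem.Dict.getD_empty]; rfl)
  simpa [B_index] using h

theorem takeWhile_append_of {p : Int → Bool} :
    ∀ (l1 : List Int), (∀ x ∈ l1, p x = true) → ∀ (l2 : List Int), (∀ x ∈ l2, p x = false) →
    (l1 ++ l2).takeWhile p = l1 := by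
  intro l1
  induction l1 with
  | nil =>
    intro _ l2 h2
    cases l2 with
    | nil => rfl
    | cons y ys => simp [h2 y (by simp)]
  | cons x xs ih =>
    intro h1 l2 h2
    rw [List.cons_append, List.takeWhile_cons, h1 x (by simp), if_pos rfl,
      ih (fun z hz => h1 z (by simp [hz])) l2 h2]

theorem mem_B_docs_from {ys : List (List Int)} {s b h i : Int}
    (hm : i ∈ (PySem.List.enumerate ys s).filterMap (fun ip =>
      if b < (ip.2.length : Int) ∧ PySem.List.pyGetD ip.2 b 0 = h then some ip.1 else none)) :
    s ≤ i := by
  rw [List.mem_filterMap] at hm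
  obtain ⟨ip, hip, hcond⟩ := hm
  rw [PySem.List.mem_enumerate_iff] at hip
  obtain ⟨k, hk, rfl⟩ := hip
  split at hcond
  · simp only [Option.some.injEq] at hcond
    subst hcond
    omega
  · exact absurd hcond (by simp)

-- the 'break at i ≥ j' cut of the full bucket is the bucket over the first j documents
theorem takeWhile_B_docs (xs : List (List Int)) (j : Nat) (hj : j ≤ xs.length) (b h : Int) :
    (B_docs xs b h).takeWhile (fun i => decide (i < (j : Int))) = B_docs (xs.take j) b h := by
  have hlen : (xs.take j).length = j := by
    rw [List.length_take]; omega
  conv_lhs => rw [show xs = xs.take j ++ xs.drop j from (List.take_append_drop j xs).symm]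
  unfold B_docs
  rw [PySem.List.enumerate_append, List.filterMap_append]
  apply takeWhile_append_of
  · intro x hx
    have hm : x ∈ B_docs (xs.take j) b h := hx
    obtain ⟨_, hlt⟩ := mem_B_docs hm
    rw [hlen] at hlt
    simpa using hlt
  · intro x hx
    have hge : (0 : Int) + ((xs.take j).length : Int) ≤ x := mem_B_docs_from hx
    rw [hlen] at hge
    simp only [decide_eq_false_iff_not, not_lt]
    omega

-- B's query phase, with the index replaced by its model and the cut by the document prefix
theorem alt_eq (bh : List (List Int)) (P : Int) :
    find_candidate_pairs_multi_probe_alt bh P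
      = (PySem.List.enumerate bh).foldl (fun S jp =>
          (PySem.List.enumerate jp.2).foldl (fun S bp =>
            (PySem.List.pyRange 1 (P + 1) 1).foldl (fun S d =>
                (B_docs (PySem.List.slice bh none (some jp.1)) bp.1 (bp.2 + d)).foldl
                  (fun s i => PySem.Set.add s (i, jp.1)) S)
              ((B_docs (PySem.List.slice bh none (some jp.1)) bp.1 bp.2).foldl
                (fun s i => PySem.Set.add s (i, jp.1)) S)) S) PySem.Set.empty := by
  unfold find_candidate_pairs_multi_probe_alt
  have hidx := B_index_spec bh
  apply PySem.List.foldl_congr_mem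
  intro S jp hjp
  rw [PySem.List.mem_enumerate_iff] at hjp
  obtain ⟨k, hk, rfl⟩ := hjp
  have hj1 : ((0 : Int) + (k : Nat), bh[k]).1 = ((k : Nat) : Int) := by simp
  have hslice : PySem.List.slice bh none (some (((0 : Int) + (k : Nat), bh[k]).1))
      = bh.take k := by
    rw [hj1, PySem.List.slice_to_natCast]
  apply PySem.List.foldl_congr_mem
  intro S bp hbp
  rw [PySem.List.mem_enumerate_iff] at hbp
  obtain ⟨m, hm, rfl⟩ := hbp
  have hb0 : (0 : Int) ≤ ((0 : Int) + (m : Nat), bh[k][m]).1 := by simp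
  have hcut : ∀ t : Int,
      ((B_index bh).getD (((0 : Int) + (m : Nat), bh[k][m]).1, t) []).takeWhile
          (fun i => decide (i < ((0 : Int) + (k : Nat), bh[k]).1))
        = B_docs (PySem.List.slice bh none (some (((0 : Int) + (k : Nat), bh[k]).1)))
            (((0 : Int) + (m : Nat), bh[k][m]).1) t := by
    intro t
    rw [hidx _ t hb0, hslice, hj1]
    exact takeWhile_B_docs bh k (le_of_lt hk) _ t
  rw [hcut]
  apply PySem.List.foldl_congr_mem
  intro S d _
  rw [hcut]

-- ===== VERDICT (by name: the statement is the Claim_ definition above) =====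
theorem find_candidate_pairs_multi_probe_spec : Claim_equal_find_candidate_pairs_multi_probe := by
  intro band_hashes num_probes _
  unfold Spec_find_candidate_pairs_multi_probe
  rw [alt_eq]
  unfold find_candidate_pairs_multi_probe
  have h := outer_loop num_probes band_hashes band_hashes [] PySem.Dict.empty PySem.Set.empty
    rfl (by intro b h hb; simp [B_docs_nil, PySem.Dict.getD_empty, PySem.Dict.contains_empty])
  simpa using h
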